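-- pv_equiv track=rewrite | github.com/minju0329/Search_expert | NTIS/Thread_Analysis.py | career
-- ===== SOURCE A (Python) =====
-- def career(stdYear):
--     crr_list = []
--     for i in range(len(stdYear)):
--         _max = max(stdYear[i])
--         _min = min(stdYear[i])
--         crr = _max-_min+1
--         crr_list.append(crr)
--     return crr_list
-- ===== SOURCE B (Python) =====
-- def career(stdYear):
--     return [ys_sorted[-1] - ys_sorted[0] + 1
--             for ys_sorted in map(sorted, stdYear)]
-- ===== Notes on version B (the rewrite author's own statement) =====
-- stated objective: alternative
-- what changed: sorts each sublist and takes last - first + 1 of the sorted list, instead of calling max() and min() on the raw sublist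
import Mathlib
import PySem

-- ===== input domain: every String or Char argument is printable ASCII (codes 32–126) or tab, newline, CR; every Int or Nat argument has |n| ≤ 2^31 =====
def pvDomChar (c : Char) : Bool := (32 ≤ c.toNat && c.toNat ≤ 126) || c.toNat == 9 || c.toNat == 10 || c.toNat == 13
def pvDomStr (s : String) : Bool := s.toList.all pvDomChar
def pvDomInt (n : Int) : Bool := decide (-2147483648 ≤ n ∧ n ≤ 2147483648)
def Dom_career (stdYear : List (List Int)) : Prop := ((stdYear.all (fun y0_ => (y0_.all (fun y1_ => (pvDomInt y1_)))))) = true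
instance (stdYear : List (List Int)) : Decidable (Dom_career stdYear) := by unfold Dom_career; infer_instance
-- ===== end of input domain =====

-- B sorts each sublist and takes last - first + 1, instead of A's max()/min() calls; different algorithm, honest extra log factor.
-- Pre_ excludes inputs containing an empty sublist, on which A raises ValueError (B raises IndexError).


-- ===== PORT A =====
-- for i in range(len(stdYear)): crr = max(stdYear[i]) - min(stdYear[i]) + 1; append.
-- an empty row makes max/min raise ValueError (Option = none); outside Pre_ we take getD 0.
def career (stdYear : List (List Int)) : List Int :=
  stdYear.foldl
    (fun crr_list row =>
      let _max := (PySem.List.max? row (fun y => y)).getD 0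
      let _min := (PySem.List.min? row (fun y => y)).getD 0
      crr_list ++ [_max - _min + 1]) []

-- ===== PORT B =====
-- [s[-1] - s[0] + 1 for s in map(sorted, stdYear)]; on an empty row Source B's s[-1] raises
-- IndexError (pyGet? = none), so outside Pre_ we take getD 0.
def career_alt (stdYear : List (List Int)) : List Int :=
  (stdYear.map (fun ys => PySem.List.sorted ys (fun x => x) false)).map
    (fun s => (PySem.List.pyGet? s (-1)).getD 0 - (PySem.List.pyGet? s 0).getD 0 + 1)

-- ===== PRECONDITION & SPEC =====
-- Pre_ excludes inputs with an empty sublist: there A raises ValueError (B raises IndexError).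
def Pre_career (stdYear : List (List Int)) : Prop := (stdYear.all (fun ys => !ys.isEmpty)) = true
instance (stdYear : List (List Int)) : Decidable (Pre_career stdYear) := by unfold Pre_career; infer_instance
def pvWitness_career : List (List Int) := [[3, 1, 7], [5], [-2, 0]]

def Spec_career (stdYear : List (List Int)) (out : List Int) : Prop := out = career_alt stdYear
instance (stdYear : List (List Int)) (out : List Int) : Decidable (Spec_career stdYear out) := by unfold Spec_career; infer_instance

-- ===== CLAIM (what is proved, stated in full; the proofs are below) =====
def Claim_equal_career : Prop := ∀ (stdYear : List (List Int)), Dom_career stdYear → Pre_career stdYear → Spec_career stdYear (career stdYear)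

-- ===== LEMMAS AND PROOFS =====

theorem foldlMin_mem (t : List Int) : ∀ x : Int, t.foldl min x ∈ x :: t := by
  induction t with
  | nil => intro x; simp
  | cons y t ih =>
    intro x
    simp only [List.foldl_cons]
    rcases List.mem_cons.1 (ih (min x y)) with h | h
    · rw [h]
      rcases le_total x y with hxy | hxy
      · simp [min_eq_left hxy]
      · simp [min_eq_right hxy]
    · simp [h]

theorem foldlMin_le (t : List Int) : ∀ x : Int, ∀ y ∈ x :: t, t.foldl min x ≤ y := by
  induction t with
  | nil => intro x y hy; simp at hy; simp [hy]
  | cons z t ih =>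
    intro x y hy
    simp only [List.foldl_cons]
    have hseed : t.foldl min (min x z) ≤ min x z := ih (min x z) (min x z) (List.mem_cons_self ..)
    rcases List.mem_cons.1 hy with h | h
    · exact le_trans hseed (by simp [h])
    · rcases List.mem_cons.1 h with h2 | h2
      · exact le_trans hseed (by simp [h2])
      · exact ih (min x z) y (List.mem_cons_of_mem _ h2)

theorem foldlMax_mem (t : List Int) : ∀ x : Int, t.foldl max x ∈ x :: t := by
  induction t with
  | nil => intro x; simp
  | cons y t ih =>
    intro x
    simp only [List.foldl_cons]
    rcases List.mem_cons.1 (ih (max x y)) with h | h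
    · rw [h]
      rcases le_total x y with hxy | hxy
      · simp [max_eq_right hxy]
      · simp [max_eq_left hxy]
    · simp [h]

theorem foldlMax_ge (t : List Int) : ∀ x : Int, ∀ y ∈ x :: t, y ≤ t.foldl max x := by
  induction t with
  | nil => intro x y hy; simp at hy; simp [hy]
  | cons z t ih =>
    intro x y hy
    simp only [List.foldl_cons]
    have hseed : max x z ≤ t.foldl max (max x z) := ih (max x z) (max x z) (List.mem_cons_self ..)
    rcases List.mem_cons.1 hy with h | h
    · exact le_trans (by simp [h] : y ≤ max x z) hseed
    · rcases List.mem_cons.1 h with h2 | h2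
      · exact le_trans (by simp [h2] : y ≤ max x z) hseed
      · exact ih (max x z) y (List.mem_cons_of_mem _ h2)

-- in a ≤-chain, getLast dominates every element
theorem pairwise_getLast_ge (l : List Int) :
    l.Pairwise (· ≤ ·) → ∀ (h : l ≠ []) (y : Int), y ∈ l → y ≤ l.getLast h := by
  induction l with
  | nil => intro _ h; exact absurd rfl h
  | cons a t ih =>
    intro hl h y hy
    rcases List.pairwise_cons.1 hl with ⟨ha, ht⟩
    cases t with
    | nil => simp at hy; simp [hy, List.getLast]
    | cons b u =>
      rw [List.getLast_cons (by simp)]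
      rcases List.mem_cons.1 hy with h2 | h2
      · subst h2
        exact le_trans (ha b (List.mem_cons_self ..))
          (ih ht (by simp) b (List.mem_cons_self ..))
      · exact ih ht (by simp) y h2

theorem career_foldl_eq_map (xs : List (List Int)) (f : List Int → Int) :
    ∀ init : List Int, xs.foldl (fun acc row => acc ++ [f row]) init = init ++ xs.map f := by
  induction xs with
  | nil => intro init; simp
  | cons r t ih => intro init; simp [List.foldl_cons, ih (init ++ [f r])]

-- per-row agreement on a nonempty row
theorem career_row_eq (row : List Int) (hrow : row ≠ []) :
    (PySem.List.max? row (fun y => y)).getD 0 - (PySem.List.min? row (fun y => y)).getD 0 + 1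
    = (PySem.List.pyGet? (PySem.List.sorted row (fun x => x) false) (-1)).getD 0
      - (PySem.List.pyGet? (PySem.List.sorted row (fun x => x) false) 0).getD 0 + 1 := by
  cases row with
  | nil => exact absurd rfl hrow
  | cons x t =>
    set s := PySem.List.sorted (x :: t) (fun x => x) false with hs
    have hsne : s ≠ [] := by
      rw [hs, Ne, PySem.List.sorted_eq_nil_iff]; simp
    obtain ⟨m, ts, hcons⟩ := List.exists_cons_of_ne_nil hsne
    have hperm : s.Perm (x :: t) := PySem.List.sorted_perm ..
    have hpw : s.Pairwise (fun a b => a ≤ b) := PySem.List.sorted_pairwise ..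
    -- head of sorted is the min value
    have hmmem : m ∈ (x :: t) := hperm.mem_iff.1 (by simp [hcons])
    have hmle : ∀ y ∈ (x :: t), m ≤ y := PySem.List.key_head_sorted_le (x :: t) (fun x => x) (hs ▸ hcons)
    have hmin : t.foldl min x = m :=
      le_antisymm (foldlMin_le t x m hmmem) (hmle _ (foldlMin_mem t x))
    -- last of sorted is the max value
    have hlast_mem : s.getLast hsne ∈ (x :: t) := hperm.mem_iff.1 (List.getLast_mem hsne)
    have hlast_ge : ∀ y ∈ (x :: t), y ≤ s.getLast hsne := by
      intro y hy
      exact pairwise_getLast_ge s hpw hsne y (hperm.mem_iff.2 hy)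
    have hmax : t.foldl max x = s.getLast hsne :=
      le_antisymm (hlast_ge _ (foldlMax_mem t x)) (foldlMax_ge t x _ hlast_mem)
    rw [PySem.List.max?_id_cons, PySem.List.min?_id_cons,
        PySem.List.pyGet?_neg_one, PySem.List.pyGet?_zero,
        List.getLast?_eq_some_getLast hsne, hmax, hmin]
    congr 1
    congr 1
    rw [hcons]; simp

theorem career_spec : Claim_equal_career := by
  unfold Claim_equal_career
  intro stdYear _ hpre
  unfold Spec_career career career_alt
  unfold Pre_career at hpre
  rw [List.all_eq_true] at hpre
  rw [career_foldl_eq_map, List.nil_append, List.map_map]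
  apply List.map_congr_left
  intro row hrow
  have : row ≠ [] := by
    have := hpre row hrow
    simpa [List.isEmpty_iff] using this
  simpa using career_row_eq row this
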